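-- pv_equiv track=rewrite | github.com/RBH2004/Competeitive_programming | i wanna be the guy.py | caller
-- ===== SOURCE A (Python) =====
-- def caller(s):
--     my_list=[]
--     new_string=""
--     for i in range(len(s)):
--         if i==0:
--             pass
--         elif "0"<=s[i]<="9":
--             new_string+=s[i]
--         elif s[i]==" ":
--             my_list.append((new_string))
--             new_string=""
--     my_list.append((new_string))
--     return my_list
-- ===== SOURCE B (Python) =====
-- def caller(s):
--     kept = "".join(c for c in s[1:] if "0" <= c <= "9" or c == " ")
--     return kept.split(" ")
-- ===== Notes on version B (the rewrite author's own statement) =====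
-- stated objective: idiomatic
-- what changed: Replaces the manual index loop with running accumulator and boundary appends by filtering s[1:] down to ASCII digit and separator characters and handing the token splitting to the str.split library call.
import Mathlib
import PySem

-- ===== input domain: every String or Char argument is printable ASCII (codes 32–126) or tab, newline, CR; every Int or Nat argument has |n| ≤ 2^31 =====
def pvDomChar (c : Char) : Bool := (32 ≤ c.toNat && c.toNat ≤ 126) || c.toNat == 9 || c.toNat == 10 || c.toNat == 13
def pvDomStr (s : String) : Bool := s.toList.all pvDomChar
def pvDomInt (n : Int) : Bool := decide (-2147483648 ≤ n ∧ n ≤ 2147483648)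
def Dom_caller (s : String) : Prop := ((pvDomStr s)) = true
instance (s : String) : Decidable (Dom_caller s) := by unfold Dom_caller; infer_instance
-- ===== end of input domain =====

-- B replaces A's manual index loop and accumulator by filter(digits/spaces) of s[1:] + str.split(' '); idiomatic, same cost.

-- ===== PORT A =====
-- the loop body of A: state = (my_list, new_string), input = (i, s[i])
def callerStep (acc : List String × List Char) (ic : Int × Char) : List String × List Char :=
  if ic.1 == 0 then acc
  else if decide ('0' ≤ ic.2 ∧ ic.2 ≤ '9') then (acc.1, acc.2 ++ [ic.2])
  else if ic.2 == ' ' then (acc.1 ++ [String.ofList acc.2], [])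
  else acc

def caller (s : String) : List String :=
  let r := (PySem.List.enumerate s.toList 0).foldl callerStep ([], [])
  r.1 ++ [String.ofList r.2]

-- ===== PORT B =====
def caller_alt (s : String) : List String :=
  let kept := (PySem.List.slice s.toList (some 1) none).filter
      (fun c => decide ('0' ≤ c ∧ c ≤ '9') || c == ' ')
  (kept.splitOn ' ').map String.ofList

-- ===== PRECONDITION & SPEC =====
def Spec_caller (s : String) (out : List String) : Prop := out = caller_alt s
instance (s : String) (out : List String) : Decidable (Spec_caller s out) := by unfold Spec_caller; infer_instance

-- ===== CLAIM (what is proved, stated in full; the proofs are below) =====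
def Claim_equal_caller : Prop := ∀ (s : String), Dom_caller s → Spec_caller s (caller s)

-- ===== LEMMAS AND PROOFS =====

def pvKeep (c : Char) : Bool := decide ('0' ≤ c ∧ c ≤ '9') || c == ' '

-- loop invariant for A's fold, for indices ≥ 1 and a space-free accumulator
theorem caller_loop (cs : List Char) : ∀ (k : Int) (ml : List String) (ns : List Char),
    1 ≤ k → (' ' ∉ ns) →
    ((PySem.List.enumerate cs k).foldl callerStep (ml, ns)).1 ++
      [String.ofList ((PySem.List.enumerate cs k).foldl callerStep (ml, ns)).2] =
      ml ++ (((ns ++ cs.filter pvKeep).splitOn ' ').map String.ofList) := by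
  induction cs with
  | nil =>
    intro k ml ns hk hns
    simp only [PySem.List.enumerate_nil, List.foldl_nil, List.filter_nil, List.append_nil]
    rw [List.splitOn, List.splitOnP_eq_single]
    · simp
    · intro x hx h
      simp only [beq_iff_eq] at h
      subst h; exact hns hx
  | cons c cs ih =>
    intro k ml ns hk hns
    rw [PySem.List.enumerate_cons, List.foldl_cons]
    have hk0 : (k == 0) = false := by simp; omega
    by_cases hd : '0' ≤ c ∧ c ≤ '9'
    · have hcs : (c == ' ') = false := by
        simp only [beq_eq_false_iff_ne, ne_eq]
        rintro rfl; exact absurd hd.1 (by decide)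
      have : callerStep (ml, ns) (k, c) = (ml, ns ++ [c]) := by
        simp [callerStep, hk0, hd]
      rw [this, ih (k+1) ml (ns ++ [c]) (by omega)
            (by simp [hns]; rintro rfl; exact absurd hd.1 (by decide))]
      have : pvKeep c = true := by simp [pvKeep, hd]
      simp [this]
    · by_cases hsp : c = ' '
      · subst hsp
        have : callerStep (ml, ns) (k, ' ') = (ml ++ [String.ofList ns], []) := by
          simp [callerStep, hk0]
        rw [this, ih (k+1) (ml ++ [String.ofList ns]) [] (by omega) (by simp)]
        have hpf : ∀ x ∈ ns, ¬((x == ' ') = true) := by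
          intro x hx h
          simp only [beq_iff_eq] at h
          subst h; exact hns hx
        simp only [List.filter_cons, show pvKeep ' ' = true from by decide, reduceIte,
          List.nil_append, List.splitOn]
        rw [List.splitOnP_first (· == ' ') ns hpf ' ' (by simp)]
        simp
      · have : callerStep (ml, ns) (k, c) = (ml, ns) := by
          simp [callerStep, hk0, hd, hsp]
        rw [this, ih (k+1) ml ns (by omega) hns]
        have : pvKeep c = false := by simp [pvKeep, hd, hsp]
        simp [this]

theorem caller_eq_alt (s : String) : caller s = caller_alt s := by
  unfold caller caller_alt
  cases hcs : s.toList with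
  | nil => simp [PySem.List.slice, PySem.List.enumerate_nil, List.splitOn]
  | cons c cs =>
    rw [PySem.List.enumerate_cons, List.foldl_cons]
    have h1 : callerStep ([], []) ((0 : Int), c) = ([], []) := by simp [callerStep]
    rw [h1]
    have h2 : PySem.List.slice (c :: cs) (some 1) none = cs := by
      simp [PySem.List.slice]
    rw [h2]
    have := caller_loop cs 1 [] [] (by omega) (by simp)
    simp only [List.nil_append] at this
    exact this

-- ===== VERDICT (by name: the statement is the Claim_ definition above) =====
theorem caller_spec : Claim_equal_caller := by
  intro s _
  exact caller_eq_alt s
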